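-- pv_equiv track=rewrite | github.com/lang-uk/ner-uk | scripts/ner_utils.py | format_token_as_beios
-- ===== SOURCE A (Python) =====
-- def format_token_as_beios(token: str, tag: str) -> list:
--     t_words = token.split()
--     res = []
--     if len(t_words) == 1:
--         res.append(token + " S-" + tag)
--     else:
--         res.append(t_words[0] + " B-" + tag)
--         for t_word in t_words[1:-1]:
--             res.append(t_word + " I-" + tag)
--         res.append(t_words[-1] + " E-" + tag)
--     return res
-- ===== SOURCE B (Python) =====
-- def _beios_rest(ws: list, tag: str) -> list:
--     # tags the remaining words recursively: last word gets E, earlier ones I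
--     if len(ws) == 1:
--         return [ws[0] + " E-" + tag]
--     return [ws[0] + " I-" + tag] + _beios_rest(ws[1:], tag)
--
--
-- def format_token_as_beios(token: str, tag: str) -> list:
--     words = token.split()
--     if len(words) == 1:
--         return [token + " S-" + tag]
--     return [words[0] + " B-" + tag] + _beios_rest(words[1:], tag)
-- ===== Notes on version B (the rewrite author's own statement) =====
-- stated objective: alternative
-- what changed: B replaces A's first/middle/last branch-and-slice append loop by a structural recursion on the word list: a helper recurses down the tail emitting I-tags and an E-tag at the base, with the B-tag prepended once at the top; Pre_ excludes whitespace-only tokens, on which A raises IndexError.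
-- outside the precondition, e.g. on format_token_as_beios('', 'LOC'): A raises IndexError, B raises IndexError
import Mathlib
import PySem

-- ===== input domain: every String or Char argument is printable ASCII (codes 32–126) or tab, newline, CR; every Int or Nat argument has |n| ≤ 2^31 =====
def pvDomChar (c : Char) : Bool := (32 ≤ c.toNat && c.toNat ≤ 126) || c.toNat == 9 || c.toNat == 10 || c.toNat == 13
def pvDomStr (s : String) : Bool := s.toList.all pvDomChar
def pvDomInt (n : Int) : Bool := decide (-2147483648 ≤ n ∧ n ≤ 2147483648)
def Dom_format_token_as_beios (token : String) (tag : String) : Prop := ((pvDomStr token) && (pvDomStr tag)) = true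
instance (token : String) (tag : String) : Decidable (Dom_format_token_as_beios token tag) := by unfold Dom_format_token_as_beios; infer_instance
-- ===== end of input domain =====

-- B tags the words by structural recursion on the word list (E at the base, I on the way,
-- B prepended at the top), instead of A's first/middle/last branch-and-slice loop.

-- ===== PORT A =====
def format_token_as_beios (token : String) (tag : String) : List String :=
  let t_words := PySem.Str.split₀ token
  let res : List String := []
  if t_words.length == 1 then
    res ++ [token ++ " S-" ++ tag]
  else
    match PySem.List.pyGet? t_words 0, PySem.List.pyGet? t_words (-1) with
    | some w0, some wl =>
      let res := res ++ [w0 ++ " B-" ++ tag]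
      let res := (PySem.List.slice t_words (some 1) (some (-1))).foldl
        (fun acc w => acc ++ [w ++ " I-" ++ tag]) res
      res ++ [wl ++ " E-" ++ tag]
    | _, _ => []  -- IndexError (t_words is empty); excluded by Pre_

-- ===== PORT B =====
def beiosRest (tag : String) : List String → List String
  | [] => []  -- unreachable: _beios_rest is always called on a nonempty list
  | [w] => [w ++ " E-" ++ tag]
  | w :: ws => (w ++ " I-" ++ tag) :: beiosRest tag ws

def format_token_as_beios_alt (token : String) (tag : String) : List String :=
  let words := PySem.Str.split₀ token
  if words.length == 1 then
    [token ++ " S-" ++ tag]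
  else
    match words with
    | w :: rest => (w ++ " B-" ++ tag) :: beiosRest tag rest
    | [] => []  -- IndexError (words is empty); excluded by Pre_

-- ===== PRECONDITION & SPEC =====
-- Pre_ excludes only whitespace-only tokens, on which A raises IndexError (t_words[0] of an empty split).
def Pre_format_token_as_beios (token : String) (tag : String) : Prop :=
  PySem.Str.split₀ token ≠ []
instance (token : String) (tag : String) : Decidable (Pre_format_token_as_beios token tag) := by
  unfold Pre_format_token_as_beios; infer_instance
def pvWitness_format_token_as_beios : String × String := ("New York", "LOC")

def Spec_format_token_as_beios (token : String) (tag : String) (out : List String) : Prop :=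
  out = format_token_as_beios_alt token tag
instance (token : String) (tag : String) (out : List String) : Decidable (Spec_format_token_as_beios token tag out) := by
  unfold Spec_format_token_as_beios; infer_instance

-- ===== CLAIM =====
def Claim_equal_format_token_as_beios : Prop := ∀ (token : String) (tag : String), Dom_format_token_as_beios token tag → Pre_format_token_as_beios token tag → Spec_format_token_as_beios token tag (format_token_as_beios token tag)

-- ===== LEMMAS AND PROOFS =====

lemma slice_one_neg_one (a b : String) (ms : List String) :
    PySem.List.slice (a :: (ms ++ [b])) (some 1) (some (-1)) = ms := by
  simp [PySem.List.slice, PySem.List.clampIdx]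
  rw [if_neg (by omega)]
  simp

lemma beiosRest_concat (tag b : String) (ms : List String) :
    beiosRest tag (ms ++ [b]) = ms.map (fun w => w ++ " I-" ++ tag) ++ [b ++ " E-" ++ tag] := by
  induction ms with
  | nil => simp [beiosRest]
  | cons m ms ih =>
    rcases ms with _ | ⟨m', ms'⟩
    · simp [beiosRest]
    · rw [show beiosRest tag (m :: m' :: ms' ++ [b])
            = (m ++ " I-" ++ tag) :: beiosRest tag (m' :: ms' ++ [b]) from rfl, ih]
      simp

-- ===== VERDICT =====
theorem format_token_as_beios_spec : Claim_equal_format_token_as_beios := by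
  intro token tag _ hpre
  unfold Spec_format_token_as_beios format_token_as_beios format_token_as_beios_alt
  unfold Pre_format_token_as_beios at hpre
  rcases h : PySem.Str.split₀ token with _ | ⟨w, rest⟩
  · exact absurd h hpre
  · rcases List.eq_nil_or_concat rest with hr | ⟨ms, b, hr⟩
    · subst hr; simp
    · subst hr
      simp only [List.concat_eq_append] at *
      have hlen : ¬ ((w :: (ms ++ [b])).length == 1) = true := by simp
      rw [if_neg hlen, if_neg hlen]
      rw [PySem.List.pyGet?_zero_cons, PySem.List.pyGet?_neg_one]
      have hl : (w :: (ms ++ [b])).getLast? = some b := by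
        rw [show w :: (ms ++ [b]) = (w :: ms) ++ [b] by simp, List.getLast?_concat]
      rw [hl]
      dsimp only
      rw [slice_one_neg_one, PySem.List.foldl_append_singleton_eq_map, beiosRest_concat]
      simp
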